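-- pv_equiv track=rewrite | github.com/javsorbla/game-library | backend/games/mergesort.py | _total_comparisons
-- ===== SOURCE A (Python) =====
-- def _total_comparisons(n: int) -> int:
--     """Upper bound on comparisons for merge sort with n elements."""
--     if n <= 1:
--         return 0
--     total = 0
--     size = 1
--     while size < n:
--         for start in range(0, n, size * 2):
--             mid = min(start + size, n)
--             end = min(start + size * 2, n)
--             left_len = mid - start
--             right_len = end - mid
--             total += left_len + right_len - 1
--         size *= 2
--     return total
-- ===== SOURCE B (Python) =====
-- def _total_comparisons(n: int) -> int:
--     """Upper bound on comparisons for merge sort with n elements.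
--
--     Per merge pass with block size `size`, every merged block of length L
--     costs L - 1 comparisons, and the blocks partition the n elements into
--     ceil(n / (2*size)) blocks, so the pass contributes
--     n - ceil(n / (2*size)).  Summing over the O(log n) passes replaces A's
--     O(n)-per-pass inner loop with a closed form per pass.
--     """
--     if n <= 1:
--         return 0
--     total = 0
--     size = 1
--     while size < n:
--         total += n - (-(-n // (2 * size)))
--         size *= 2
--     return total
-- ===== Notes on version B (the rewrite author's own statement) =====
-- stated objective: faster
-- what changed: Replaces the O(n) inner loop over merge blocks by the closed-form per-pass contribution n - ceil(n/(2*size)), keeping only the O(log n) pass loop.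
import Mathlib
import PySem

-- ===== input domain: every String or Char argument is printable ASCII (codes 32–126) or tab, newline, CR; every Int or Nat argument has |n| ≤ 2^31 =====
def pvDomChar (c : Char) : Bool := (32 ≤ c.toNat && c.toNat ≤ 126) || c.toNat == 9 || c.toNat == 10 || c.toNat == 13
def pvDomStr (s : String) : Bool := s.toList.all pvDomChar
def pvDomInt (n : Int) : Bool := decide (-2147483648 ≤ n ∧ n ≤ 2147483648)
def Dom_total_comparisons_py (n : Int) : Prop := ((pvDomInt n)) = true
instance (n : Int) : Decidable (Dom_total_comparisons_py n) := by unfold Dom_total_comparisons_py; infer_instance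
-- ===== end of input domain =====

-- B replaces A's O(n) inner loop over merge blocks by the closed-form per-pass
-- contribution n - ceil(n/(2*size)) (objective: faster, O(log n) passes only).

-- ===== PORT A =====
-- while size < n: inner for-loop over range(0, n, size*2), then size *= 2.
def tcLoopA (n size total : Int) (hs : 1 ≤ size) : Int :=
  if h : size < n then
    tcLoopA n (size * 2)
      ((PySem.List.pyRange 0 n (size * 2)).foldl
        (fun total start =>
          let mid := min (start + size) n
          let e := min (start + size * 2) n
          let left_len := mid - start
          let right_len := e - mid
          total + (left_len + right_len - 1)) total)
      (by omega)
  else total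
termination_by (n - size).toNat
decreasing_by omega

def total_comparisons_py (n : Int) : Int :=
  if n ≤ 1 then 0
  else tcLoopA n 1 0 (by norm_num)

-- ===== PORT B =====
-- while size < n: total += n - (-(-n // (2*size))); size *= 2.
def tcLoopB (n size total : Int) (hs : 1 ≤ size) : Int :=
  if h : size < n then
    tcLoopB n (size * 2) (total + (n - (-(PySem.Int.floordiv (-n) (2 * size))))) (by omega)
  else total
termination_by (n - size).toNat
decreasing_by omega

def total_comparisons_py_alt (n : Int) : Int :=
  if n ≤ 1 then 0
  else tcLoopB n 1 0 (by norm_num)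

-- ===== PRECONDITION & SPEC =====
def Spec_total_comparisons_py (n : Int) (out : Int) : Prop := out = total_comparisons_py_alt n
instance (n : Int) (out : Int) : Decidable (Spec_total_comparisons_py n out) := by unfold Spec_total_comparisons_py; infer_instance

-- ===== CLAIM (what is proved, stated in full; the proofs are below) =====
def Claim_equal_total_comparisons_py : Prop := ∀ (n : Int), Dom_total_comparisons_py n → Spec_total_comparisons_py n (total_comparisons_py n)

-- ===== LEMMAS AND PROOFS =====

-- The inner-loop body of A simplifies pointwise: mid cancels.
theorem tc_fold_fn_eq (n size : Int) :
    (fun (total start : Int) =>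
      let mid := min (start + size) n
      let e := min (start + size * 2) n
      let left_len := mid - start
      let right_len := e - mid
      total + (left_len + right_len - 1))
    = (fun total start => total + (min (start + size * 2) n - start - 1)) := by
  funext total start
  simp only []
  ring

-- Full blocks: as long as s*c ≤ n every block costs s - 1.
theorem tc_full_blocks (n s : Int) (hs : 0 < s) :
    ∀ (c : Nat) (acc : Int), s * (c : Int) ≤ n →
      ((List.range c).map (fun (k : Nat) => (0 : Int) + s * (k : Int))).foldl
        (fun total start => total + (min (start + s) n - start - 1)) acc
      = acc + (c : Int) * (s - 1) := by
  intro c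
  induction c with
  | zero => intro acc _; simp
  | succ c ih =>
    intro acc h
    have hsc : s * (c : Int) ≤ n := by push_cast at h ⊢; nlinarith
    have hfull : (0 + s * (c : Int)) + s ≤ n := by push_cast at h; linarith
    rw [List.range_succ, List.map_append, List.foldl_append, ih acc hsc]
    simp only [List.map_cons, List.map_nil, List.foldl_cons, List.foldl_nil]
    rw [min_eq_left hfull]
    push_cast
    ring

-- One pass: the inner loop contributes n - ceil(n/s) with ceil(n/s) = (n+s-1)/s (ediv).
theorem tc_pass (n s acc : Int) (hs : 0 < s) (hn : 0 < n) :
    (PySem.List.pyRange 0 n s).foldl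
      (fun total start => total + (min (start + s) n - start - 1)) acc
    = acc + n - (n + s - 1) / s := by
  set m := (n + s - 1) / s with hm
  have hdm := Int.mul_ediv_add_emod (n + s - 1) s
  have hr0 : 0 ≤ (n + s - 1) % s := Int.emod_nonneg _ (by omega)
  have hrs : (n + s - 1) % s < s := Int.emod_lt_of_pos _ hs
  -- s*(m-1) < n ≤ s*m
  have hub : n ≤ s * m := by rw [hm]; nlinarith [hdm]
  have hlb : s * (m - 1) < n := by rw [hm]; nlinarith [hdm]
  have hm1 : 1 ≤ m := by nlinarith
  rw [PySem.List.pyRange_of_pos 0 n hs, if_pos (by omega : (0:Int) < n)]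
  have hcnt : ((n - 0 + s - 1) / s).toNat = m.toNat := by
    simp only [Int.sub_zero]; rw [hm]
  rw [hcnt]
  obtain ⟨c, hc⟩ : ∃ c : Nat, m.toNat = c + 1 := ⟨m.toNat - 1, by omega⟩
  rw [hc, List.range_succ, List.map_append, List.foldl_append]
  have hcInt : (c : Int) = m - 1 := by omega
  have hfullc : s * (c : Int) ≤ n := by rw [hcInt]; linarith
  rw [tc_full_blocks n s hs c acc hfullc]
  simp only [List.map_cons, List.map_nil, List.foldl_cons, List.foldl_nil]
  rw [min_eq_right (by rw [hcInt]; linarith : n ≤ 0 + s * (c : Int) + s)]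
  rw [hcInt]; ring

-- B's ceiling expression equals (n+s-1)/s for s > 0.
theorem tc_ceil_eq (n s : Int) (hs : 0 < s) :
    -(PySem.Int.floordiv (-n) s) = (n + s - 1) / s := by
  unfold PySem.Int.floordiv
  rw [Int.fdiv_eq_ediv_of_nonneg _ (by omega)]
  set m := (n + s - 1) / s with hm
  set q := (-n) / s with hq
  have hdm := Int.mul_ediv_add_emod (n + s - 1) s
  have hr0 : 0 ≤ (n + s - 1) % s := Int.emod_nonneg _ (by omega)
  have hrs : (n + s - 1) % s < s := Int.emod_lt_of_pos _ hs
  have hdq := Int.mul_ediv_add_emod (-n) s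
  have hq0 : 0 ≤ (-n) % s := Int.emod_nonneg _ (by omega)
  have hqs : (-n) % s < s := Int.emod_lt_of_pos _ hs
  have hub : n ≤ s * m := by rw [hm]; nlinarith [hdm]
  have hlb : s * (m - 1) < n := by rw [hm]; nlinarith [hdm]
  have hub' : n ≤ s * (-q) := by rw [hq]; nlinarith [hdq]
  have hlb' : s * (-q - 1) < n := by rw [hq]; nlinarith [hdq]
  have h1 : m - 1 < -q := by nlinarith
  have h2 : -q - 1 < m := by nlinarith
  omega

-- The two loops agree.
theorem tc_loop_eq (n : Int) (hn : 1 < n) :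
    ∀ (size total : Int) (hs : 1 ≤ size),
      tcLoopA n size total hs = tcLoopB n size total hs := by
  intro size total hs
  induction size, total, hs using tcLoopA.induct n with
  | case1 size total hs h ih =>
    rw [tcLoopA, tcLoopB, dif_pos h, dif_pos h, ih]
    congr 1
    rw [tc_fold_fn_eq, tc_pass n (size * 2) total (by omega) (by omega),
        mul_comm 2 size, tc_ceil_eq n (size * 2) (by omega)]
    ring
  | case2 size total hs h =>
    rw [tcLoopA, tcLoopB, dif_neg h, dif_neg h]

-- ===== VERDICT (by name: the statement is the Claim_ definition above) =====
theorem total_comparisons_py_spec : Claim_equal_total_comparisons_py := by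
  intro n _
  unfold Spec_total_comparisons_py total_comparisons_py total_comparisons_py_alt
  by_cases h : n ≤ 1
  · rw [if_pos h, if_pos h]
  · rw [if_neg h, if_neg h]
    exact tc_loop_eq n (by omega) 1 0 (by norm_num)
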